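-- pv_equiv track=rewrite | github.com/ebehlmann/puzzling | python/advent_of_code/2015/day_5/day_5.py | check_for_vowels_and_doubles
-- ===== SOURCE A (Python) =====
-- def check_for_vowels_and_doubles(s, vowel_min):
-- 	vowels = ['a', 'e', 'i', 'o', 'u']
-- 	vowel_count = 0
-- 	doubles = False
-- 	i = 0
-- 	while i < len(s):
-- 		if s[i] in vowels:
-- 			vowel_count += 1
-- 		if i < len(s) - 1 and s[i] == s[i+1]:
-- 			doubles = True
-- 		i += 1
-- 	if vowel_count >= vowel_min and doubles == True:
-- 		return True
-- 	return False
-- ===== SOURCE B (Python) =====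
-- def check_for_vowels_and_doubles(s, vowel_min):
--     vowel_count = sum(s.count(v) for v in 'aeiou')
--     doubles = any(c + c in s for c in set(s))
--     return vowel_count >= vowel_min and doubles
-- ===== Notes on version B (the rewrite author's own statement) =====
-- stated objective: alternative
-- what changed: Replaced the single index-based scan by library string queries: the vowel count is the sum of s.count(v) over the five vowels, and the double-letter test asks whether c+c occurs as a substring of s for some distinct character c of s.
import Mathlib
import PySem

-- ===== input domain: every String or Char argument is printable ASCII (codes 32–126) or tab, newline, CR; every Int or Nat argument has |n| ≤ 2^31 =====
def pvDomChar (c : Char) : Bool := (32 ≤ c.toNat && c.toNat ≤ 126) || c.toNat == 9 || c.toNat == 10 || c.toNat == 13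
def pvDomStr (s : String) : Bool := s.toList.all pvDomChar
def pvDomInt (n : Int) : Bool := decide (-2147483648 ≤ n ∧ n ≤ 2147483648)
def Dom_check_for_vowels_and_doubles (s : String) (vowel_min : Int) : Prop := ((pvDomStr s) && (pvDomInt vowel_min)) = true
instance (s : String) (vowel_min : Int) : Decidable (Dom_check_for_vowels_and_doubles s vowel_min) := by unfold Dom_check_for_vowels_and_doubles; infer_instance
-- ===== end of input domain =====

-- B replaces A's single index-based scan by library string queries: per-vowel s.count sums
-- and a substring test 'c+c in s' over the distinct characters of s; objective: alternative.

-- ===== PORT A =====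
-- A's while-loop: index i, running vowel_count and doubles flag.
def pvALoop (cs : List Char) (i : Nat) (vc : Int) (doubles : Bool) : Int × Bool :=
  if _h : i < cs.length then
    let vc' := if cs.getD i 'x' ∈ ['a', 'e', 'i', 'o', 'u'] then vc + 1 else vc
    let doubles' := if i < cs.length - 1 ∧ cs.getD i 'x' = cs.getD (i+1) 'x' then true else doubles
    pvALoop cs (i+1) vc' doubles'
  else (vc, doubles)
termination_by cs.length - i

def check_for_vowels_and_doubles (s : String) (vowel_min : Int) : Bool :=
  let r := pvALoop s.toList 0 0 false
  if vowel_min ≤ r.1 ∧ r.2 = true then true else false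

-- ===== PORT B =====
def check_for_vowels_and_doubles_alt (s : String) (vowel_min : Int) : Bool :=
  let vowel_count : Int := (("aeiou".toList).map (fun v => (PySem.Str.count s (String.ofList [v]) : Int))).sum
  let doubles := (PySem.Set.ofList s.toList).any (fun c => PySem.Str.isIn (String.ofList [c, c]) s)
  decide (vowel_min ≤ vowel_count) && doubles

-- ===== PRECONDITION & SPEC =====
def Spec_check_for_vowels_and_doubles (s : String) (vowel_min : Int) (out : Bool) : Prop := out = check_for_vowels_and_doubles_alt s vowel_min
instance (s : String) (vowel_min : Int) (out : Bool) : Decidable (Spec_check_for_vowels_and_doubles s vowel_min out) := by unfold Spec_check_for_vowels_and_doubles; infer_instance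

-- ===== CLAIM (what is proved, stated in full; the proofs are below) =====
def Claim_equal_check_for_vowels_and_doubles : Prop := ∀ (s : String) (vowel_min : Int), Dom_check_for_vowels_and_doubles s vowel_min → Spec_check_for_vowels_and_doubles s vowel_min (check_for_vowels_and_doubles s vowel_min)

-- ===== LEMMAS AND PROOFS =====

-- A's loop computes the indicator sum and the adjacent-pair any.
lemma pvALoop_spec (cs : List Char) (i : Nat) (vc : Int) (d : Bool) :
    pvALoop cs i vc d =
      (vc + ((cs.drop i).map (fun c => if c ∈ ['a', 'e', 'i', 'o', 'u'] then (1 : Int) else 0)).sum,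
       d || ((cs.drop i).zip (cs.drop (i+1))).any (fun p => p.1 == p.2)) := by
  by_cases h : i < cs.length
  · rw [pvALoop]
    simp only [h, dif_pos]
    rw [pvALoop_spec cs (i+1)]
    have hdi : cs.drop i = cs[i] :: cs.drop (i+1) := List.drop_eq_getElem_cons h
    by_cases h1 : i + 1 < cs.length
    · have hdi1 : cs.drop (i+1) = cs[i+1] :: cs.drop (i+2) := List.drop_eq_getElem_cons h1
      have hg : cs.getD i 'x' = cs[i] := List.getD_eq_getElem cs 'x' h
      have hg1 : cs.getD (i+1) 'x' = cs[i+1] := List.getD_eq_getElem cs 'x' h1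
      have hlt : i < cs.length - 1 := by omega
      rw [hdi, hdi1]
      simp only [List.map_cons, List.sum_cons, List.zip_cons_cons, List.any_cons, hg, hg1, hlt,
        true_and, Prod.mk.injEq]
      constructor
      · split_ifs <;> ring
      · by_cases he : cs[i] = cs[i+1]
        · simp [he]
        · have hbe : (cs[i] == cs[i+1]) = false := by simp [he]
          rw [if_neg he]
          simp [hbe, show i+1+1 = i+2 from rfl]
    · have hdi1 : cs.drop (i+1) = [] := List.drop_eq_nil_of_le (by omega)
      have hnl : ¬ i < cs.length - 1 := by omega
      have hg : cs.getD i 'x' = cs[i] := List.getD_eq_getElem cs 'x' h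
      have hdi2 : cs.drop (i+2) = [] := List.drop_eq_nil_of_le (by omega)
      rw [hdi, hdi1, hdi2]
      simp only [List.map_cons, List.sum_cons, List.zip_nil_right, List.map_nil, List.sum_nil,
        List.any_nil, Bool.or_false, hnl, false_and, if_false, hg, Prod.mk.injEq]
      constructor
      · split_ifs <;> ring
      · trivial
  · have hd : cs.drop i = [] := List.drop_eq_nil_of_le (by omega)
    have hd1 : cs.drop (i+1) = [] := List.drop_eq_nil_of_le (by omega)
    rw [pvALoop]
    simp [h, hd, hd1]
termination_by cs.length - i

-- Python's s.count(c) for a single character is the element count.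
lemma count_go_singleton (v : Char) (l : List Char) (fuel acc : Nat) (h : l.length ≤ fuel) :
    PySem.Chars.count.go [v] fuel l acc = acc + l.count v := by
  induction l generalizing fuel acc with
  | nil => cases fuel <;> simp [PySem.Chars.count.go]
  | cons a t ih =>
    cases fuel with
    | zero => simp at h
    | succ f =>
      rw [PySem.Chars.count.go]
      have hd : List.drop [v].length (a :: t) = t := rfl
      have hf : t.length ≤ f := by simp at h; omega
      by_cases hv : v = a
      · have hp : List.isPrefixOf [v] (a :: t) = true := by simp [List.isPrefixOf, hv]
        simp only [hp, if_pos, hd]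
        rw [ih f (acc + 1) hf]
        subst hv
        simp
        omega
      · have hp : List.isPrefixOf [v] (a :: t) = false := by
          simp [List.isPrefixOf]; simpa using hv
        simp only [hp, Bool.false_eq_true, if_false]
        rw [ih f acc hf]
        simp [List.count_cons]
        exact fun h' => hv h'.symm

lemma count_singleton (cs : List Char) (v : Char) :
    PySem.Chars.count cs [v] = cs.count v := by
  rw [PySem.Chars.count]
  simp only [List.isEmpty_cons, Bool.false_eq_true, if_false]
  rw [count_go_singleton v cs cs.length 0 le_rfl]
  omega

-- Summing the five per-vowel counts equals summing the per-character indicator.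
lemma sum_counts (cs : List Char) :
    (("aeiou".toList).map (fun v => (cs.count v : Int))).sum =
      (cs.map (fun c => if c ∈ ['a', 'e', 'i', 'o', 'u'] then (1 : Int) else 0)).sum := by
  have hv : "aeiou".toList = ['a', 'e', 'i', 'o', 'u'] := by decide
  rw [hv]
  induction cs with
  | nil => simp
  | cons c t ih =>
    simp only [List.map_cons, List.map_nil, List.sum_cons, List.sum_nil, List.count_cons] at *
    rw [← ih]
    push_cast
    split_ifs <;> simp_all <;> omega

-- Adjacent equal pair iff some doubled character is an infix.
lemma adj_iff_infix : ∀ cs : List Char,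
    ((cs.zip (cs.drop 1)).any (fun p => p.1 == p.2) = true) ↔ ∃ c, [c, c] <:+: cs
  | [] => by
      constructor
      · simp
      · rintro ⟨c, h⟩; have := h.length_le; simp at this
  | [a] => by
      constructor
      · simp
      · rintro ⟨c, h⟩; have := h.length_le; simp at this
  | a :: b :: t => by
      have ih := adj_iff_infix (b :: t)
      simp only [List.drop_succ_cons, List.drop_zero, List.zip_cons_cons, List.any_cons,
        Bool.or_eq_true, beq_iff_eq] at *
      constructor
      · rintro (h | h)
        · subst h
          exact ⟨a, (List.cons_prefix_cons.mpr ⟨rfl,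
            List.cons_prefix_cons.mpr ⟨rfl, List.nil_prefix⟩⟩).isInfix⟩
        · obtain ⟨c, hc⟩ := ih.mp h
          exact ⟨c, List.infix_cons_iff.mpr (Or.inr hc)⟩
      · rintro ⟨c, hc⟩
        rcases List.infix_cons_iff.mp hc with hp | hi
        · obtain ⟨h1, hp2⟩ := List.cons_prefix_cons.mp hp
          obtain ⟨h2, _⟩ := List.cons_prefix_cons.mp hp2
          subst h1; exact Or.inl h2
        · exact Or.inr (ih.mpr ⟨c, hi⟩)

-- The set-based doubled-substring test equals the adjacent-pair test.
lemma doubles_eq (s : String) :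
    (PySem.Set.ofList s.toList).any (fun c => PySem.Str.isIn (String.ofList [c, c]) s) =
      (s.toList.zip (s.toList.drop 1)).any (fun p => p.1 == p.2) := by
  rw [Bool.eq_iff_iff]
  constructor
  · rintro h
    simp only [List.any_eq_true] at h
    obtain ⟨c, _, hin⟩ := h
    have hinf : [c, c] <:+: s.toList := by
      have := (PySem.Str.isIn_iff_infix _ _).mp hin
      simpa using this
    exact (adj_iff_infix s.toList).mpr ⟨c, hinf⟩
  · intro h
    obtain ⟨c, hinf⟩ := (adj_iff_infix s.toList).mp h
    have hmem : c ∈ s.toList := hinf.subset (by simp)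
    simp only [List.any_eq_true]
    refine ⟨c, (PySem.Set.mem_ofList _ _).mpr hmem, ?_⟩
    rw [PySem.Str.isIn_iff_infix]
    simpa using hinf

lemma if_and_eq_and (P : Prop) [Decidable P] (X : Bool) :
    (if P ∧ X = true then true else false) = (decide P && X) := by
  by_cases hp : P <;> cases X <;> simp [hp]

-- ===== VERDICT (by name: the statement is the Claim_ definition above) =====
theorem check_for_vowels_and_doubles_spec : Claim_equal_check_for_vowels_and_doubles := by
  intro s vowel_min _
  unfold Spec_check_for_vowels_and_doubles check_for_vowels_and_doubles check_for_vowels_and_doubles_alt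
  rw [pvALoop_spec]
  simp only [List.drop_zero, zero_add, List.drop_one]
  rw [if_and_eq_and, doubles_eq]
  have hc : ∀ v : Char, PySem.Str.count s (String.ofList [v]) = s.toList.count v := by
    intro v
    rw [PySem.Str.count_eq]
    simpa using count_singleton s.toList v
  simp only [hc, sum_counts, List.drop_one, Bool.false_or]
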